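-- pv_equiv track=rewrite | github.com/goodbetterbestco/paperx | pipeline/acquisition/remediation_plan_status.py | _wave_status
-- ===== SOURCE A (Python) =====
-- from typing import Any
--
-- def _wave_status(runs: list[dict[str, Any]]) -> str:
--     if not runs:
--         return "pending"
--     execute_runs = [run for run in runs if run["mode"] == "execute"]
--     if not execute_runs:
--         return "planned_only"
--     latest_execute = execute_runs[-1]
--     if int(latest_execute.get("failed_count", 0) or 0) > 0:
--         return "failed"
--     return "succeeded"
-- ===== SOURCE B (Python) =====
-- def _wave_status(runs):
--     # Right-fold state machine: one pass over reversed(runs) carrying the final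
--     # status directly; no intermediate filtered list, no indexing.
--     status = "pending"
--     for run in reversed(runs):
--         if run["mode"] == "execute" and status in ("pending", "planned_only"):
--             status = "failed" if int(run.get("failed_count", 0) or 0) > 0 else "succeeded"
--         elif status == "pending":
--             status = "planned_only"
--     return status
-- ===== Notes on version B (the rewrite author's own statement) =====
-- stated objective: alternative
-- what changed: Replaces A's staged passes (build a filtered execute_runs list, index its last element, then branch) with a single state-machine fold over reversed(runs) whose accumulator is the answer string itself, updated per element and never filtering or indexing.
import Mathlib
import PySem

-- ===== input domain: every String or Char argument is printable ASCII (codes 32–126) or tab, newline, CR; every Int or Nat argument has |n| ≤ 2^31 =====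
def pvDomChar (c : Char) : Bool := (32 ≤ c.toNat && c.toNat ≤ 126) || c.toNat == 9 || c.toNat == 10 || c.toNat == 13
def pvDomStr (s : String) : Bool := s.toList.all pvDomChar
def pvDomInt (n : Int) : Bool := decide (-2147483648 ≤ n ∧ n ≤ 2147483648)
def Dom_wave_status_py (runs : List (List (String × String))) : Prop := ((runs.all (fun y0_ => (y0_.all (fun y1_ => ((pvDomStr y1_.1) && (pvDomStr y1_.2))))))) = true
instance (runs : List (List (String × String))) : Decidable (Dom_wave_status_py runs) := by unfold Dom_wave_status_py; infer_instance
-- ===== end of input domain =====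

-- B replaces A's staged passes (filter into execute_runs, take [-1], branch) with a single
-- state-machine fold over reversed(runs) whose accumulator is the answer string itself.

-- shared helper: int(run.get("failed_count", 0) or 0), exact on Pre_ (where the string parses)
def pyFailedCount (r : List (String × String)) : Int :=
  match (PySem.Dict.ofList r).get? "failed_count" with
  | none => 0
  | some s => if s == "" then 0 else (PySem.Int.ofStr? s).getD 0

def fcOK (r : List (String × String)) : Bool :=
  match (PySem.Dict.ofList r).get? "failed_count" with
  | none => true
  | some s => s == "" || (PySem.Int.ofStr? s).isSome

def isExecute (r : List (String × String)) : Bool :=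
  (PySem.Dict.ofList r).get? "mode" == some "execute"

-- ===== PORT A =====
def wave_status_py (runs : List (List (String × String))) : String :=
  if runs.isEmpty then "pending"
  else
    let execute_runs := runs.filter isExecute
    if execute_runs.isEmpty then "planned_only"
    else
      match PySem.List.pyGet? execute_runs (-1) with
      | some latest_execute =>
          if pyFailedCount latest_execute > 0 then "failed" else "succeeded"
      | none => "planned_only"   -- unreachable: execute_runs is nonempty

-- ===== PORT B =====
-- loop body of B: one step of the state machine (status is the accumulator)
def altStep (status : String) (run : List (String × String)) : String :=
  if isExecute run && (status == "pending" || status == "planned_only") then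
    if pyFailedCount run > 0 then "failed" else "succeeded"
  else if status == "pending" then "planned_only"
  else status

def wave_status_py_alt (runs : List (List (String × String))) : String :=
  runs.reverse.foldl altStep "pending"

-- ===== PRECONDITION & SPEC =====
-- Pre_ excludes exactly the inputs on which A raises: a run without a "mode" key (KeyError),
-- and a latest execute run whose nonempty "failed_count" string is not a valid int literal (ValueError).
def Pre_wave_status_py (runs : List (List (String × String))) : Prop :=
  (∀ r ∈ runs, ((PySem.Dict.ofList r).get? "mode").isSome) ∧
  (∀ r, (runs.filter isExecute).getLast? = some r → fcOK r = true)
instance (runs : List (List (String × String))) : Decidable (Pre_wave_status_py runs) := by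
  unfold Pre_wave_status_py; infer_instance
def pvWitness_wave_status_py : (List (List (String × String))) :=
  [[("mode", "plan")], [("mode", "execute"), ("failed_count", "2")]]
def Spec_wave_status_py (runs : List (List (String × String))) (out : String) : Prop := out = wave_status_py_alt runs
instance (runs : List (List (String × String))) (out : String) : Decidable (Spec_wave_status_py runs out) := by unfold Spec_wave_status_py; infer_instance

-- ===== CLAIM (what is proved, stated in full; the proofs are below) =====
def Claim_equal_wave_status_py : Prop := ∀ (runs : List (List (String × String))), Dom_wave_status_py runs → Pre_wave_status_py runs → Spec_wave_status_py runs (wave_status_py runs)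

-- ===== LEMMAS AND PROOFS =====

-- the canonical result of the last execute run, as A computes it
def lastExecResult (runs : List (List (String × String))) : String :=
  match (runs.filter isExecute).getLast? with
  | none => "planned_only"
  | some r => if pyFailedCount r > 0 then "failed" else "succeeded"

-- B's fold peels the FIRST run of the list as its LAST step
theorem alt_cons (x : List (String × String)) (rest : List (List (String × String))) :
    wave_status_py_alt (x :: rest) = altStep (wave_status_py_alt rest) x := by
  unfold wave_status_py_alt
  simp [List.foldl_append]

-- characterisation of B's fold on nonempty input
theorem alt_char (runs : List (List (String × String))) (h : runs ≠ []) :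
    wave_status_py_alt runs = lastExecResult runs := by
  induction runs with
  | nil => exact absurd rfl h
  | cons x rest ih =>
      rw [alt_cons]
      cases hrest : rest with
      | nil =>
          unfold wave_status_py_alt altStep lastExecResult
          by_cases hx : isExecute x = true
          · simp [hx, List.filter]
          · simp only [Bool.not_eq_true] at hx
            simp [hx, List.filter]
      | cons y ys =>
          rw [← hrest, ih (by simp [hrest])]
          unfold lastExecResult altStep
          cases hg : (rest.filter isExecute).getLast? with
          | none =>
              have hrf : rest.filter isExecute = [] := List.getLast?_eq_none_iff.mp hg
              by_cases hx : isExecute x = true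
              · simp [hx, hrf]
              · simp only [Bool.not_eq_true] at hx
                simp [hx, hrf]
          | some r =>
              have hrf : rest.filter isExecute ≠ [] := by
                intro he; rw [he] at hg; simp at hg
              have hlast : ((x :: rest).filter isExecute).getLast? = some r := by
                rw [List.filter_cons]
                by_cases hx : isExecute x = true
                · simp only [hx, if_pos]
                  exact Option.mem_def.mp (List.mem_getLast?_cons (Option.mem_def.mpr hg))
                · simp only [Bool.not_eq_true] at hx
                  simp [hx, hg]
              rw [hlast]
              by_cases hf : pyFailedCount r > 0
              · simp [hf]
              · simp [hf]

-- ===== VERDICT (by name: the statement is the Claim_ definition above) =====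
theorem wave_status_py_spec : Claim_equal_wave_status_py := by
  intro runs _ _
  unfold Spec_wave_status_py
  by_cases he : runs = []
  · subst he; rfl
  · rw [alt_char runs he]
    unfold wave_status_py lastExecResult
    have hne : runs.isEmpty = false := by simp [he]
    simp only [hne, Bool.false_eq_true, if_false]
    rw [PySem.List.pyGet?_neg_one]
    cases hg : (runs.filter isExecute).getLast? with
    | none =>
        have : runs.filter isExecute = [] := List.getLast?_eq_none_iff.mp hg
        simp [this]
    | some latest =>
        have hfe : (runs.filter isExecute).isEmpty = false := by
          cases hl : runs.filter isExecute with
          | nil => rw [hl] at hg; simp at hg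
          | cons a as => rfl
        simp [hfe]
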